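-- pv_equiv track=rewrite | github.com/galaxyproject/tools-iuc | tools/ngs-qc/libngs.py | getorganism
-- ===== SOURCE A (Python) =====
-- def getorganism(genome):
--     organisms = {
--         'Homo sapiens': ['hg18', 'hg19'],
--         'Mus musculus': ['mm8', 'mm9', 'mm10'],
--         'Caenorhabditis elegans': ['ce4', 'ce6', 'ce10'],
--         'Danio rerio': ['danRer5', 'danRer6', 'danRer7'],
--         'Drosophila melanogaster': ['dm3'],
--         'Rattus norvegicus': ['rn3', 'rn4', 'rn5'],
--         'Arabidopsis thaliana': ['TAIR10'],
--         'Gallus gallus': ['galGal4']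
--     }
--
--     for k, v in organisms.items():
--         if genome in v:
--             return k
--     return None
-- ===== SOURCE B (Python) =====
-- _INDEX = {
--     'hg18': 'Homo sapiens', 'hg19': 'Homo sapiens',
--     'mm8': 'Mus musculus', 'mm9': 'Mus musculus', 'mm10': 'Mus musculus',
--     'ce4': 'Caenorhabditis elegans', 'ce6': 'Caenorhabditis elegans', 'ce10': 'Caenorhabditis elegans',
--     'danRer5': 'Danio rerio', 'danRer6': 'Danio rerio', 'danRer7': 'Danio rerio',
--     'dm3': 'Drosophila melanogaster',
--     'rn3': 'Rattus norvegicus', 'rn4': 'Rattus norvegicus', 'rn5': 'Rattus norvegicus',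
--     'TAIR10': 'Arabidopsis thaliana',
--     'galGal4': 'Gallus gallus',
-- }
--
-- def getorganism(genome):
--     return _INDEX.get(genome)
-- ===== Notes on version B (the rewrite author's own statement) =====
-- stated objective: idiomatic
-- what changed: Replaces the per-call scan over (organism, assembly-list) pairs with inner membership tests by a flat module-level {assembly: organism} reverse table answered by one dict lookup.
import Mathlib
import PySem

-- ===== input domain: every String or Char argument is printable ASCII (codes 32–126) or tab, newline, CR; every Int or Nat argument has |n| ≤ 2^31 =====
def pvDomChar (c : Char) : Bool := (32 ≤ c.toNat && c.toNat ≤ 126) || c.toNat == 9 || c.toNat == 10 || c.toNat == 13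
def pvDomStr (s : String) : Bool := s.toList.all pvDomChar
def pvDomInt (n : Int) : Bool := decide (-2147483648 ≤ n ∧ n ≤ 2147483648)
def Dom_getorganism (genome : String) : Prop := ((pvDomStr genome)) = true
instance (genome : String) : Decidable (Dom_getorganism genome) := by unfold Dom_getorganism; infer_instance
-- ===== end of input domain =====

-- B drops A's per-call scan over (organism, assembly-list) pairs: a flat {assembly: organism} reverse table answered by one dict lookup (idiomatic; same result).

-- ===== PORT A =====
def organismsA : PySem.Dict String (List String) :=
  PySem.Dict.ofList [
    ("Homo sapiens", ["hg18", "hg19"]),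
    ("Mus musculus", ["mm8", "mm9", "mm10"]),
    ("Caenorhabditis elegans", ["ce4", "ce6", "ce10"]),
    ("Danio rerio", ["danRer5", "danRer6", "danRer7"]),
    ("Drosophila melanogaster", ["dm3"]),
    ("Rattus norvegicus", ["rn3", "rn4", "rn5"]),
    ("Arabidopsis thaliana", ["TAIR10"]),
    ("Gallus gallus", ["galGal4"])]

-- the 'for k, v in …: if genome in v: return k' loop, as first-match recursion over the items
def getorganismLoop (genome : String) : List (String × List String) → Option String
  | [] => none
  | (k, v) :: rest => if genome ∈ v then some k else getorganismLoop genome rest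

def getorganism (genome : String) : Option String :=
  getorganismLoop genome organismsA.items

-- ===== PORT B =====
-- B's module-level flat reverse table, a dict literal
def indexB : PySem.Dict String String :=
  PySem.Dict.ofList [
    ("hg18", "Homo sapiens"), ("hg19", "Homo sapiens"),
    ("mm8", "Mus musculus"), ("mm9", "Mus musculus"), ("mm10", "Mus musculus"),
    ("ce4", "Caenorhabditis elegans"), ("ce6", "Caenorhabditis elegans"), ("ce10", "Caenorhabditis elegans"),
    ("danRer5", "Danio rerio"), ("danRer6", "Danio rerio"), ("danRer7", "Danio rerio"),
    ("dm3", "Drosophila melanogaster"),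
    ("rn3", "Rattus norvegicus"), ("rn4", "Rattus norvegicus"), ("rn5", "Rattus norvegicus"),
    ("TAIR10", "Arabidopsis thaliana"),
    ("galGal4", "Gallus gallus")]

def getorganism_alt (genome : String) : Option String :=
  indexB.get? genome

-- ===== PRECONDITION & SPEC =====
def Spec_getorganism (genome : String) (out : Option String) : Prop := out = getorganism_alt genome
instance (genome : String) (out : Option String) : Decidable (Spec_getorganism genome out) := by unfold Spec_getorganism; infer_instance

-- ===== CLAIM (what is proved, stated in full; the proofs are below) =====
def Claim_equal_getorganism : Prop := ∀ (genome : String), Dom_getorganism genome → Spec_getorganism genome (getorganism genome)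

-- ===== LEMMAS AND PROOFS =====

-- ===== VERDICT (by name: the statement is the Claim_ definition above) =====
set_option maxHeartbeats 2000000 in
theorem getorganism_spec : Claim_equal_getorganism := by
  intro genome _
  unfold Spec_getorganism getorganism getorganism_alt
  have hA : organismsA.items = [
      ("Homo sapiens", ["hg18", "hg19"]),
      ("Mus musculus", ["mm8", "mm9", "mm10"]),
      ("Caenorhabditis elegans", ["ce4", "ce6", "ce10"]),
      ("Danio rerio", ["danRer5", "danRer6", "danRer7"]),
      ("Drosophila melanogaster", ["dm3"]),
      ("Rattus norvegicus", ["rn3", "rn4", "rn5"]),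
      ("Arabidopsis thaliana", ["TAIR10"]),
      ("Gallus gallus", ["galGal4"])] := by decide
  have hB : indexB = PySem.Dict.mk [
      ("hg18", "Homo sapiens"), ("hg19", "Homo sapiens"),
      ("mm8", "Mus musculus"), ("mm9", "Mus musculus"), ("mm10", "Mus musculus"),
      ("ce4", "Caenorhabditis elegans"), ("ce6", "Caenorhabditis elegans"), ("ce10", "Caenorhabditis elegans"),
      ("danRer5", "Danio rerio"), ("danRer6", "Danio rerio"), ("danRer7", "Danio rerio"),
      ("dm3", "Drosophila melanogaster"),
      ("rn3", "Rattus norvegicus"), ("rn4", "Rattus norvegicus"), ("rn5", "Rattus norvegicus"),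
      ("TAIR10", "Arabidopsis thaliana"),
      ("galGal4", "Gallus gallus")] := by decide
  rw [hA, hB]
  simp only [getorganismLoop, PySem.Dict.get?_mk_cons, List.mem_cons, List.not_mem_nil,
    or_false, beq_iff_eq]
  by_cases h1 : genome = "hg18"
  · subst h1; decide
  by_cases h2 : genome = "hg19"
  · subst h2; decide
  by_cases h3 : genome = "mm8"
  · subst h3; decide
  by_cases h4 : genome = "mm9"
  · subst h4; decide
  by_cases h5 : genome = "mm10"
  · subst h5; decide
  by_cases h6 : genome = "ce4"
  · subst h6; decide
  by_cases h7 : genome = "ce6"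
  · subst h7; decide
  by_cases h8 : genome = "ce10"
  · subst h8; decide
  by_cases h9 : genome = "danRer5"
  · subst h9; decide
  by_cases h10 : genome = "danRer6"
  · subst h10; decide
  by_cases h11 : genome = "danRer7"
  · subst h11; decide
  by_cases h12 : genome = "dm3"
  · subst h12; decide
  by_cases h13 : genome = "rn3"
  · subst h13; decide
  by_cases h14 : genome = "rn4"
  · subst h14; decide
  by_cases h15 : genome = "rn5"
  · subst h15; decide
  by_cases h16 : genome = "TAIR10"
  · subst h16; decide
  by_cases h17 : genome = "galGal4"
  · subst h17; decide
  simp [h1, h2, h3, h4, h5, h6, h7, h8, h9, h10, h11, h12, h13, h14, h15, h16, h17, eq_comm,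
    indexB, PySem.Dict.ofList, PySem.Dict.get?, PySem.Dict.insert]
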